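-- pv_equiv track=rewrite | github.com/jasonli999/Function-Scripts | 3D Function Class.py | strFunction
-- ===== SOURCE A (Python) =====
-- def strFunction(function):
--     string = str(function)
--     i = 0
--     while i < len(string):
--         if string[i] == '*' and string[i+1] == '*':
--             string = string[:i] + '^' + string[i+2:]
--             i -= 2
--         i += 1
--     i = 0
--     while i < len(string):
--         if string[i] == '*':
--             string = string[:i] + string[i+1:]
--             i -= 1
--         i += 1
--     return string
-- ===== SOURCE B (Python) =====
-- def strFunction(function):
--     s = str(function)
--     out = []
--     i = 0
--     while i < len(s):
--         if s[i] == '*' and s[i+1] == '*':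
--             out.append('^')
--             i += 2
--         elif s[i] == '*':
--             i += 1
--         else:
--             out.append(s[i])
--             i += 1
--     return ''.join(out)
-- ===== Notes on version B (the rewrite author's own statement) =====
-- stated objective: simpler
-- what changed: B replaces A's two repeated in-place string-splicing passes (with index backtracking) by a single left-to-right pass that appends to an output list: a double asterisk emits a caret, a lone asterisk is skipped, anything else is copied; strings ending in an odd run of asterisks, where both A and B raise IndexError, are outside Pre_.
import Mathlib
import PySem

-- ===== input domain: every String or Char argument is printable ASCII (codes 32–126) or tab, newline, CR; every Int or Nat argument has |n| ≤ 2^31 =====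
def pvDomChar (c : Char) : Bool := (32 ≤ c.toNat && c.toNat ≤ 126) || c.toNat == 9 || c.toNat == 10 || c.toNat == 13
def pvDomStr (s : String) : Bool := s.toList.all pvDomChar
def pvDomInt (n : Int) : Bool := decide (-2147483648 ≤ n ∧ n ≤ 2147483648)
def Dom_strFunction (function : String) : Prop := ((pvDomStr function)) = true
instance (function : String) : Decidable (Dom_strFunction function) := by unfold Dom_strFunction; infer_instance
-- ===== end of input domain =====

-- B is a single left-to-right pass building the output, instead of A's two repeated in-place
-- string-splicing passes; objective: simpler. Both raise IndexError on strings ending in an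
-- odd run of '*', which Pre_ excludes.

-- ===== PORT A =====
-- first while loop: i is a Python int (it reaches -1 after a replacement at i = 0);
-- the loop consumes no structural measure, so it carries fuel (3*len+1 is proved sufficient
-- on the states reached from i = 0 under Pre_); fuel 0 / out-of-range s[i] return s as a junk
-- value on states Python never reaches (or where Python raises, which Pre_ excludes).
def strFunctionLoop1 : Nat → List Char → Int → List Char
  | 0, s, _ => s
  | fuel + 1, s, i =>
    if i < (s.length : Int) then
      match PySem.List.pyGet? s i with
      | none => s  -- IndexError (unreachable from i = 0)
      | some c =>
        if c = '*' then
          match PySem.List.pyGet? s (i + 1) with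
          | none => s  -- IndexError: lone '*' at the end (excluded by Pre_)
          | some c2 =>
            if c2 = '*' then
              -- string = string[:i] + '^' + string[i+2:]; i -= 2; i += 1
              strFunctionLoop1 fuel
                (PySem.List.slice s none (some i) ++ '^' :: PySem.List.slice s (some (i + 2)) none)
                (i - 2 + 1)
            else strFunctionLoop1 fuel s (i + 1)
        else strFunctionLoop1 fuel s (i + 1)
    else s

-- second while loop: i never goes below 0 in Python (i -= 1 is immediately followed by
-- i += 1), so i is a Nat and the deletion branch recurses with the same i; like the first
-- loop it carries fuel (2*len+1 is proved sufficient), returning s as a junk value at 0.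
def strFunctionLoop2 : Nat → List Char → Nat → List Char
  | 0, s, _ => s
  | fuel + 1, s, i =>
    if h : i < s.length then
      if s[i] = '*' then
        -- string = string[:i] + string[i+1:]; i -= 1; i += 1
        strFunctionLoop2 fuel
          (PySem.List.slice s none (some (i : Int)) ++ PySem.List.slice s (some ((i : Int) + 1)) none) i
      else strFunctionLoop2 fuel s (i + 1)
    else s

def strFunction (function : String) : String :=
  let t := strFunctionLoop1 (3 * function.toList.length + 1) function.toList 0
  String.ofList (strFunctionLoop2 (2 * t.length + 1) t 0)

-- ===== PORT B =====
-- one pass, accumulator = Python's out list; the loop index i is transcribed as the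
-- remaining suffix s[i:] (structural recursion); s[i+1] on a lone trailing '*' is Python's
-- IndexError (excluded by Pre_), where acc is returned as a junk value.
def strFunctionGo : List Char → List Char → List Char
  | [], acc => acc
  | [c], acc => if c = '*' then acc else acc ++ [c]
  | c :: c2 :: rest, acc =>
    if c = '*' then
      if c2 = '*' then strFunctionGo rest (acc ++ ['^'])
      else strFunctionGo (c2 :: rest) acc
    else strFunctionGo (c2 :: rest) (acc ++ [c])

def strFunction_alt (function : String) : String :=
  String.ofList (strFunctionGo function.toList [])

-- ===== PRECONDITION & SPEC =====
-- Pre_ excludes exactly the strings ending in an odd-length run of '*', on which A (and B)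
-- raise IndexError.
def Pre_strFunction (function : String) : Prop :=
  (function.toList.reverse.takeWhile (· == '*')).length % 2 = 0
instance (function : String) : Decidable (Pre_strFunction function) := by
  unfold Pre_strFunction; infer_instance

def pvWitness_strFunction : String := ""

def Spec_strFunction (function : String) (out : String) : Prop := out = strFunction_alt function
instance (function : String) (out : String) : Decidable (Spec_strFunction function out) := by
  unfold Spec_strFunction; infer_instance

-- ===== CLAIM (what is proved, stated in full; the proofs are below) =====
def Claim_equal_strFunction : Prop :=
  ∀ (function : String), Dom_strFunction function → Pre_strFunction function →
    Spec_strFunction function (strFunction function)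

-- ===== LEMMAS AND PROOFS =====

-- specification function: pair '**' → '^' left to right, keep a lone '*';
-- none = a lone '*' at the very end (Python's IndexError).
def gStar : List Char → Option (List Char)
  | [] => some []
  | [c] => if c = '*' then none else some [c]
  | c :: c2 :: t' =>
    if c = '*' then
      if c2 = '*' then (gStar t').map ('^' :: ·)
      else (gStar (c2 :: t')).map (c :: ·)
    else (gStar (c2 :: t')).map (c :: ·)

-- unfolding equations for gStar
theorem gStar_cons_ne (c : Char) (t : List Char) (hc : ¬ c = '*') :
    gStar (c :: t) = (gStar t).map (c :: ·) := by
  cases t <;> simp [gStar, hc]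

theorem gStar_cons_cons_ne (c c2 : Char) (t : List Char) (h2 : ¬ c2 = '*') :
    gStar (c :: c2 :: t) = (gStar (c2 :: t)).map (c :: ·) := by
  by_cases hc : c = '*' <;> simp [gStar, hc, h2]

theorem gStar_star_star (t : List Char) :
    gStar ('*' :: '*' :: t) = (gStar t).map ('^' :: ·) := by
  simp [gStar]

-- takeWhile over an appended element / tail
theorem takeWhile_append_single (p : Char → Bool) (xs : List Char) (a : Char)
    (ha : p a = false) : (xs ++ [a]).takeWhile p = xs.takeWhile p := by
  induction xs with
  | nil => simp [List.takeWhile, ha]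
  | cons x xs ih => simp only [List.cons_append, List.takeWhile_cons]; split <;> simp [ih]

theorem takeWhile_append_of_not_all (p : Char → Bool) (xs ys : List Char)
    (h : xs.all p = false) : (xs ++ ys).takeWhile p = xs.takeWhile p := by
  induction xs with
  | nil => simp at h
  | cons x xs ih =>
    simp only [List.all_cons, Bool.and_eq_false_imp] at h
    simp only [List.cons_append, List.takeWhile_cons]
    cases hx : p x with
    | false => simp
    | true => simp [ih (h hx)]

-- trailing-run-of-'*' length
def trailStars (l : List Char) : Nat := (l.reverse.takeWhile (· == '*')).length

theorem trail_cons_ne (c : Char) (t : List Char) (hc : ¬ c = '*') :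
    trailStars (c :: t) = trailStars t := by
  simp only [trailStars, List.reverse_cons]
  rw [takeWhile_append_single _ _ _ (by simp [hc])]

theorem trail_star_star (t : List Char) (h : trailStars ('*' :: '*' :: t) % 2 = 0) :
    trailStars t % 2 = 0 := by
  by_cases hall : t.reverse.all (· == '*')
  · have h1 : trailStars t = t.length := by
      unfold trailStars
      rw [List.takeWhile_eq_self_iff.mpr (List.all_eq_true.1 hall), List.length_reverse]
    have h2 : trailStars ('*' :: '*' :: t) = t.length + 2 := by
      simp only [trailStars, List.reverse_cons, List.append_assoc]
      rw [List.takeWhile_eq_self_iff.mpr]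
      · simp
      · intro x hx
        rcases List.mem_append.1 hx with hx | hx
        · exact (List.all_eq_true.1 hall) x hx
        · simp at hx
          subst hx
          rfl
    omega
  · have h2 : trailStars ('*' :: '*' :: t) = trailStars t := by
      simp only [trailStars, List.reverse_cons, List.append_assoc]
      rw [takeWhile_append_of_not_all _ _ _ (by simpa using hall)]
    omega

theorem trail_star_cons_ne (c2 : Char) (t : List Char) (h2 : ¬ c2 = '*') :
    trailStars ('*' :: c2 :: t) = trailStars (c2 :: t) := by
  simp only [trailStars, List.reverse_cons]
  rw [takeWhile_append_of_not_all]
  simp only [List.all_append, List.all_cons]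
  simp [h2]

-- totality of gStar under the precondition
theorem gStar_isSome (l : List Char) (h : trailStars l % 2 = 0) : (gStar l).isSome := by
  induction l using gStar.induct with
  | case1 => simp [gStar]
  | case2 => exfalso; simp [trailStars, List.takeWhile] at h
  | case3 c hc => simp [gStar, hc]
  | case4 t' ih =>
    rw [gStar_star_star]
    simpa using ih (trail_star_star t' h)
  | case5 c2 t' h2 ih =>
    rw [gStar_cons_cons_ne _ _ _ h2]
    simpa using ih (by rw [trail_star_cons_ne _ _ h2] at h; exact h)
  | case6 c c2 t' hc ih =>
    by_cases h2 : c2 = '*'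
    · subst h2
      rw [gStar_cons_ne _ _ hc]
      simpa using ih (by rwa [trail_cons_ne _ _ hc] at h)
    · rw [gStar_cons_cons_ne _ _ _ h2]
      simpa using ih (by rwa [trail_cons_ne _ _ hc] at h)

-- B's pass computes gStar followed by dropping the lone stars
theorem strFunctionGo_eq (l : List Char) (r : List Char) (hg : gStar l = some r)
    (acc : List Char) :
    strFunctionGo l acc = acc ++ r.filter (fun c => !(c == '*')) := by
  induction l using gStar.induct generalizing r acc with
  | case1 =>
    simp [gStar] at hg
    subst hg
    simp [strFunctionGo]
  | case2 => simp [gStar] at hg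
  | case3 c hc =>
    simp [gStar, hc] at hg
    subst hg
    simp [strFunctionGo, hc]
  | case4 t' ih =>
    rw [gStar_star_star] at hg
    obtain ⟨r', hr', rfl⟩ := Option.map_eq_some_iff.1 hg
    rw [show strFunctionGo ('*' :: '*' :: t') acc = strFunctionGo t' (acc ++ ['^']) by
      simp [strFunctionGo]]
    rw [ih r' hr']
    simp
  | case5 c2 t' h2 ih =>
    rw [gStar_cons_cons_ne _ _ _ h2] at hg
    obtain ⟨r', hr', rfl⟩ := Option.map_eq_some_iff.1 hg
    rw [show strFunctionGo ('*' :: c2 :: t') acc = strFunctionGo (c2 :: t') acc by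
      simp [strFunctionGo, h2]]
    rw [ih r' hr']
    simp
  | case6 c c2 t' hc ih =>
    rw [show gStar (c :: c2 :: t') = (gStar (c2 :: t')).map (c :: ·) by
      by_cases h2 : c2 = '*'
      · subst h2; exact gStar_cons_ne _ _ hc
      · exact gStar_cons_cons_ne _ _ _ h2] at hg
    obtain ⟨r', hr', rfl⟩ := Option.map_eq_some_iff.1 hg
    rw [show strFunctionGo (c :: c2 :: t') acc = strFunctionGo (c2 :: t') (acc ++ [c]) by
      simp [strFunctionGo, hc]]
    rw [ih r' hr']
    simp [hc]

-- A's second loop deletes every '*'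
theorem strFunctionLoop2_eq (fuel : Nat) (s : List Char) (i : Nat)
    (hf : s.length + (s.length - i) < fuel) :
    strFunctionLoop2 fuel s i = s.take i ++ (s.drop i).filter (fun c => !(c == '*')) := by
  match fuel with
  | 0 => omega
  | fuel + 1 =>
    rw [strFunctionLoop2]
    by_cases h : i < s.length
    · have hdrop : s.drop i = s[i] :: s.drop (i+1) := List.drop_eq_getElem_cons h
      rw [dif_pos h]
      by_cases hc : s[i] = '*'
      · rw [if_pos hc]
        rw [PySem.List.slice_to_natCast,
          show ((i:Int)+1) = (((i+1 : Nat)):Int) by push_cast; ring,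
          PySem.List.slice_from_natCast]
        rw [strFunctionLoop2_eq fuel (s.take i ++ s.drop (i+1)) i
          (by simp only [List.length_append, List.length_take, List.length_drop]; omega)]
        rw [List.take_left' (by simp; omega), List.drop_left' (by simp; omega)]
        rw [hdrop]
        simp [hc]
      · rw [if_neg hc]
        rw [strFunctionLoop2_eq fuel s (i+1) (by omega)]
        rw [hdrop, List.filter_cons_of_pos (by simp [hc]), List.take_add_one,
          List.getElem?_eq_getElem h]
        simp only [Option.toList_some, List.append_assoc, List.singleton_append]
    · rw [dif_neg h]
      rw [List.drop_of_length_le (by omega), List.take_of_length_le (by omega)]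
      simp

-- A's first loop computes gStar (on the states reachable from i = 0, with enough fuel)
theorem strFunctionLoop1_eq (fuel : Nat) (s : List Char) (i : Nat) (r : List Char)
    (hg : gStar (s.drop i) = some r) (hf : 2 * s.length + (s.length - i) < fuel) :
    strFunctionLoop1 fuel s (i : Int) = s.take i ++ r := by
  match fuel with
  | 0 => omega
  | fuel + 1 =>
    rw [strFunctionLoop1]
    by_cases h : i < s.length
    · have hdrop : s.drop i = s[i] :: s.drop (i+1) := List.drop_eq_getElem_cons h
      rw [if_pos (by exact_mod_cast h)]
      rw [show PySem.List.pyGet? s (i:Int) = some s[i] by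
        rw [PySem.List.pyGet?_natCast, List.getElem?_eq_getElem h]]
      dsimp only
      by_cases hc : s[i] = '*'
      · rw [if_pos hc]
        by_cases h1 : i + 1 < s.length
        · have hdrop1 : s.drop (i+1) = s[i+1] :: s.drop (i+2) := List.drop_eq_getElem_cons h1
          rw [show PySem.List.pyGet? s ((i:Int)+1) = some s[i+1] by
            have hcast := PySem.List.pyGet?_natCast (xs := s) (n := i+1)
            push_cast at hcast
            rw [hcast, List.getElem?_eq_getElem h1]]
          dsimp only
          by_cases hc2 : s[i+1] = '*'
          · rw [if_pos hc2]
            rw [hdrop, hdrop1, hc, hc2, gStar_star_star] at hg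
            obtain ⟨r', hr', rfl⟩ := Option.map_eq_some_iff.1 hg
            rw [PySem.List.slice_to_natCast,
              show ((i:Int)+2) = (((i+2:Nat)):Int) by push_cast; ring,
              PySem.List.slice_from_natCast]
            rcases Nat.eq_zero_or_pos i with hi0 | hipos
            · -- i = 0: one further unfolding step at index -1 (no replacement there,
              -- since the new first character is '^'), then the IH at index 0
              subst hi0
              simp only [List.take_zero, List.nil_append]
              cases fuel with
              | zero => omega
              | succ fuel =>
                rw [show ((0:Nat):Int) - 2 + 1 = (-1 : Int) by norm_num]
                rw [strFunctionLoop1]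
                rw [if_pos (by simp)]
                have hIH : strFunctionLoop1 fuel ('^' :: s.drop (0+2)) 0 = '^' :: r' := by
                  have hh := strFunctionLoop1_eq fuel ('^' :: s.drop (0+2)) 0 ('^' :: r')
                    (by simp [gStar_cons_ne '^' _ (by decide), hr'])
                    (by simp only [List.length_cons, List.length_drop]; omega)
                  simpa using hh
                rcases hget : PySem.List.pyGet? ('^' :: s.drop (0+2)) (-1) with _ | c
                · rw [PySem.List.pyGet?_neg_one] at hget
                  simp at hget
                · dsimp only
                  by_cases hcs : c = '*'
                  · rw [if_pos hcs]
                    rw [show (-1 : Int) + 1 = (0:Int) by norm_num,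
                      PySem.List.pyGet?_zero_cons]
                    dsimp only
                    rw [if_neg (by decide)]
                    exact hIH
                  · rw [if_neg hcs]
                    rw [show (-1 : Int) + 1 = (0:Int) by norm_num]
                    exact hIH
            · -- i ≥ 1: the IH applies at index i - 1
              rw [show (i:Int) - 2 + 1 = (((i-1:Nat)):Int) by omega]
              have hdm1 : s.drop (i-1) = s[i-1] :: s.drop i := by
                have hh := List.drop_eq_getElem_cons (l := s) (i := i-1) (by omega)
                rwa [show i - 1 + 1 = i by omega] at hh
              have hdrop' : (s.take i ++ '^' :: s.drop (i+2)).drop (i-1)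
                  = s[i-1] :: '^' :: s.drop (i+2) := by
                rw [List.drop_append_of_le_length (by simp; omega), List.drop_take, hdm1,
                  show i - (i-1) = 1 by omega]
                simp
              have hg' : gStar ((s.take i ++ '^' :: s.drop (i+2)).drop (i-1))
                  = some (s[i-1] :: '^' :: r') := by
                rw [hdrop', gStar_cons_cons_ne _ _ _ (by decide),
                  gStar_cons_ne '^' _ (by decide), hr']
                rfl
              rw [strFunctionLoop1_eq fuel _ (i-1) _ hg'
                (by simp only [List.length_append, List.length_take, List.length_cons,
                      List.length_drop]
                    omega)]
              have htake1 : (s.take i ++ '^' :: s.drop (i+2)).take (i-1) = s.take (i-1) := by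
                rw [List.take_append_of_le_length (by simp; omega), List.take_take]
                congr 1
                omega
              have htake2 : s.take i = s.take (i-1) ++ [s[i-1]] := by
                conv_lhs => rw [show i = (i-1)+1 by omega]
                rw [List.take_add_one, List.getElem?_eq_getElem (by omega)]
                simp
              rw [htake1, htake2]
              simp only [List.append_assoc, List.singleton_append]
          · rw [if_neg hc2]
            rw [hdrop, hdrop1, hc, gStar_cons_cons_ne _ _ _ hc2, ← hdrop1] at hg
            obtain ⟨r', hr', rfl⟩ := Option.map_eq_some_iff.1 hg
            rw [show ((i:Int)+1) = (((i+1:Nat)):Int) by push_cast; ring]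
            rw [strFunctionLoop1_eq fuel s (i+1) r' hr' (by omega)]
            rw [List.take_add_one, List.getElem?_eq_getElem h, hc]
            simp only [Option.toList_some, List.append_assoc, List.singleton_append]
        · exfalso
          have : s.drop (i+1) = [] := List.drop_of_length_le (by omega)
          rw [hdrop, this, hc] at hg
          simp [gStar] at hg
      · rw [if_neg hc]
        rw [hdrop, gStar_cons_ne _ _ hc] at hg
        obtain ⟨r', hr', rfl⟩ := Option.map_eq_some_iff.1 hg
        rw [show ((i:Int)+1) = (((i+1:Nat)):Int) by push_cast; ring]
        rw [strFunctionLoop1_eq fuel s (i+1) r' hr' (by omega)]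
        rw [List.take_add_one, List.getElem?_eq_getElem h]
        simp only [Option.toList_some, List.append_assoc, List.singleton_append]
    · rw [if_neg (by exact_mod_cast h)]
      rw [List.drop_of_length_le (by omega)] at hg
      simp [gStar] at hg
      subst hg
      rw [List.take_of_length_le (by omega)]
      simp

-- ===== VERDICT (by name: the statement is the Claim_ definition above) =====
theorem strFunction_spec : Claim_equal_strFunction := by
  intro f _ hpre
  unfold Spec_strFunction strFunction strFunction_alt
  have hsome : (gStar f.toList).isSome := gStar_isSome _ hpre
  obtain ⟨r, hr⟩ := Option.isSome_iff_exists.1 hsome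
  rw [show (0 : Int) = ((0:Nat):Int) by rfl]
  rw [strFunctionLoop1_eq (3 * f.toList.length + 1) f.toList 0 r (by simpa using hr) (by omega)]
  rw [List.take_zero, List.nil_append]
  show String.ofList (strFunctionLoop2 (2 * r.length + 1) r 0) = _
  rw [strFunctionLoop2_eq (2 * r.length + 1) r 0 (by omega)]
  rw [strFunctionGo_eq f.toList r hr []]
  simp
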